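-- pv_equiv track=rewrite | github.com/everpalm/leet_code_excercise | 3. StackAndQueue/ust3.py | is_valid_xml_string
-- ===== SOURCE A (Python) =====
-- def is_valid_xml_string(s: str) -> bool:
--     stack = []
--
--     for ch in s:
--         if ch.isupper():  # Begin-tag
--             stack.append(ch)
--         elif ch.islower():  # End-tag
--             if not stack:
--                 return False  # No tag to close
--             top = stack.pop()
--             if ch != top.lower():
--                 return False  # Mismatched tag
--         else:
--             return False  # Invalid character
--
--     return len(stack) == 0  # All tags must be closed
-- ===== SOURCE B (Python) =====
-- def is_valid_xml_string(s: str) -> bool: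
--     for ch in s:
--         if not (ch.isupper() or ch.islower()):
--             return False  # Invalid character
--     t = list(s)
--     reduced = True
--     while reduced:
--         reduced = False
--         for i in range(len(t) - 1):
--             if t[i].isupper() and t[i + 1] == t[i].lower():
--                 del t[i:i + 2]
--                 reduced = True
--                 break
--     return not t
-- ===== Notes on version B (the rewrite author's own statement) =====
-- stated objective: alternative
-- what changed: Replaces the single left-to-right stack pass by repeated elimination of the first adjacent Upper/matching-lower pair until no pair remains (string empty iff valid), after an upfront all-letters check.
import Mathlib
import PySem

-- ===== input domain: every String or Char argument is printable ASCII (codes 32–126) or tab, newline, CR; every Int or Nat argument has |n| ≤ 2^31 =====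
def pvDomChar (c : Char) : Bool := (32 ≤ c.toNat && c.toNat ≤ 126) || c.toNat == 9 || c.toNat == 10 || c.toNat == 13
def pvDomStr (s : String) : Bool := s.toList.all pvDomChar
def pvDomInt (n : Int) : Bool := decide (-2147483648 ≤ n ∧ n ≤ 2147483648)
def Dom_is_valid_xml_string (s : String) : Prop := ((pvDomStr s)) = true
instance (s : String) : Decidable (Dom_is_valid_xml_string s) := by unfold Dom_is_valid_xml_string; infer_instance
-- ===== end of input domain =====

-- B replaces A's single stack pass by repeated elimination of the first adjacent
-- Upper/matching-lower pair until none remains (alternative algorithm, not faster).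

-- ===== PORT A =====
-- the for-loop over s with the stack; Python appends/pops the list end, modelled as the head of the list
def pvRunA : List Char → List Char → Bool
  | stack, [] => stack.length == 0
  | stack, ch :: rest =>
    if PySem.Chars.isupper ch then pvRunA (ch :: stack) rest
    else if PySem.Chars.islower ch then
      match stack with
      | [] => false
      | top :: stack' =>
        if ch ≠ PySem.Chars.lowerChar top then false else pvRunA stack' rest
    else false

def is_valid_xml_string (s : String) : Bool := pvRunA [] s.toList

-- ===== PORT B =====
def pvIsLetter (c : Char) : Bool := PySem.Chars.isupper c || PySem.Chars.islower c

-- one inner for-pass of Source B: find and delete the first adjacent pair (none = no removal happened)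
def pvReduceOnce : List Char → Option (List Char)
  | a :: b :: r =>
    if PySem.Chars.isupper a && (b == PySem.Chars.lowerChar a) then some r
    else (pvReduceOnce (b :: r)).map (a :: ·)
  | _ => none

theorem pvReduceOnce_length : ∀ {t t' : List Char}, pvReduceOnce t = some t' → t'.length < t.length := by
  intro t
  induction t with
  | nil => intro t' h; simp [pvReduceOnce] at h
  | cons a r ih =>
    intro t' h
    match r, h with
    | [], h => simp [pvReduceOnce] at h
    | b :: r, h =>
      rw [pvReduceOnce] at h
      split at h
      · cases h; simp
      · simp only [Option.map_eq_some_iff] at h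
        obtain ⟨t'', h1, rfl⟩ := h
        have := ih h1
        simp only [List.length_cons] at this ⊢
        omega

-- the while-loop of Source B
def pvLoopB (t : List Char) : Bool :=
  match h : pvReduceOnce t with
  | some t' => pvLoopB t'
  | none => t.isEmpty
termination_by t.length
decreasing_by exact pvReduceOnce_length h

def is_valid_xml_string_alt (s : String) : Bool :=
  if s.toList.all pvIsLetter then pvLoopB s.toList else false

-- ===== PRECONDITION & SPEC =====
def Spec_is_valid_xml_string (s : String) (out : Bool) : Prop := out = is_valid_xml_string_alt s
instance (s : String) (out : Bool) : Decidable (Spec_is_valid_xml_string s out) := by unfold Spec_is_valid_xml_string; infer_instance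

-- ===== CLAIM (what is proved, stated in full; the proofs are below) =====
def Claim_equal_is_valid_xml_string : Prop := ∀ (s : String), Dom_is_valid_xml_string s → Spec_is_valid_xml_string s (is_valid_xml_string s)

-- ===== LEMMAS AND PROOFS =====

theorem pvRunA_nil (st : List Char) : pvRunA st [] = (st.length == 0) := rfl

theorem pvRunA_cons (st : List Char) (ch : Char) (rest : List Char) :
    pvRunA st (ch :: rest) =
      (if PySem.Chars.isupper ch then pvRunA (ch :: st) rest
       else if PySem.Chars.islower ch then
         (match st with
          | [] => false
          | top :: st' => if ch ≠ PySem.Chars.lowerChar top then false else pvRunA st' rest)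
       else false) := rfl

theorem pv_char_le (a b : Char) : (a ≤ b) ↔ a.toNat ≤ b.toNat := by
  rw [Char.le_def, UInt32.le_iff_toNat_le]; rfl

theorem pv_toNat_ofNat {n : Nat} (h : n ≤ 122) : (Char.ofNat n).toNat = n := by
  have hv : n.isValidChar := Or.inl (by omega)
  simp [Char.ofNat, hv, Char.ofNatAux, Char.toNat]

theorem pv_upper_bounds {c : Char} (h : PySem.Chars.isupper c = true) :
    65 ≤ c.toNat ∧ c.toNat ≤ 90 := by
  simp only [PySem.Chars.isupper, Bool.and_eq_true, decide_eq_true_eq, pv_char_le] at h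
  exact h

theorem pv_lowerChar_eq {c : Char} (h : PySem.Chars.isupper c = true) :
    PySem.Chars.lowerChar c = Char.ofNat (c.toNat + 32) := by
  rw [PySem.Chars.lowerChar, if_pos h]

theorem pv_lower_islower {c : Char} (h : PySem.Chars.isupper c = true) :
    PySem.Chars.islower (PySem.Chars.lowerChar c) = true := by
  obtain ⟨h1, h2⟩ := pv_upper_bounds h
  rw [pv_lowerChar_eq h]
  have ht : (Char.ofNat (c.toNat + 32)).toNat = c.toNat + 32 := pv_toNat_ofNat (by omega)
  simp only [PySem.Chars.islower, Bool.and_eq_true, decide_eq_true_eq, pv_char_le, ht]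
  have ha : ('a' : Char).toNat = 97 := rfl
  have hz : ('z' : Char).toNat = 122 := rfl
  omega

theorem pv_lower_not_isupper {c : Char} (h : PySem.Chars.isupper c = true) :
    PySem.Chars.isupper (PySem.Chars.lowerChar c) = false := by
  obtain ⟨h1, h2⟩ := pv_upper_bounds h
  rw [pv_lowerChar_eq h]
  have ht : (Char.ofNat (c.toNat + 32)).toNat = c.toNat + 32 := pv_toNat_ofNat (by omega)
  rw [Bool.eq_false_iff]
  intro hcon
  simp only [PySem.Chars.isupper, Bool.and_eq_true, decide_eq_true_eq, pv_char_le, ht] at hcon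
  have hZ : ('Z' : Char).toNat = 90 := rfl
  omega

-- a non-letter anywhere forces A to return False
theorem pvRunA_bad : ∀ (t st : List Char),
    t.all pvIsLetter = false → pvRunA st t = false := by
  intro t
  induction t with
  | nil => intro st h; simp at h
  | cons c r ih =>
    intro st h
    simp only [List.all_cons, Bool.and_eq_false_iff] at h
    rw [pvRunA_cons]
    by_cases hu : PySem.Chars.isupper c = true
    · have hr : r.all pvIsLetter = false := by
        rcases h with h | h
        · simp [pvIsLetter, hu] at h
        · exact h
      simp only [hu, if_true]
      exact ih _ hr
    · rw [Bool.not_eq_true] at hu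
      simp only [hu, Bool.false_eq_true, if_false]
      by_cases hl : PySem.Chars.islower c = true
      · have hr : r.all pvIsLetter = false := by
          rcases h with h | h
          · simp [pvIsLetter, hu, hl] at h
          · exact h
        simp only [hl, if_true]
        cases st with
        | nil => rfl
        | cons top st' =>
          by_cases hm : c = PySem.Chars.lowerChar top
          · simp only [hm, ne_eq, not_true_eq_false, if_false]
            exact ih _ hr
          · simp [hm]
      · rw [Bool.not_eq_true] at hl
        simp [hl]

-- removing an adjacent matching pair does not change A's verdict
theorem pvRunA_pair : ∀ (u : List Char) (X : Char) (v st : List Char),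
    PySem.Chars.isupper X = true →
    pvRunA st (u ++ X :: PySem.Chars.lowerChar X :: v) = pvRunA st (u ++ v) := by
  intro u
  induction u with
  | nil =>
    intro X v st hX
    simp only [List.nil_append]
    rw [pvRunA_cons, if_pos hX, pvRunA_cons]
    rw [if_neg (by simp [pv_lower_not_isupper hX]), if_pos (pv_lower_islower hX)]
    simp
  | cons a u' ih =>
    intro X v st hX
    simp only [List.cons_append]
    rw [pvRunA_cons, pvRunA_cons]
    by_cases ha : PySem.Chars.isupper a = true
    · simp only [ha, if_true]
      exact ih X v (a :: st) hX
    · rw [Bool.not_eq_true] at ha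
      simp only [ha, Bool.false_eq_true, if_false]
      by_cases hl : PySem.Chars.islower a = true
      · simp only [hl, if_true]
        cases st with
        | nil => rfl
        | cons top st' =>
          by_cases hm : a = PySem.Chars.lowerChar top
          · simp only [hm, ne_eq, not_true_eq_false, if_false]
            exact ih X v st' hX
          · simp [hm]
      · rw [Bool.not_eq_true] at hl
        simp [hl]

-- pvReduceOnce t = none means no deletable adjacent pair
theorem pvReduceOnce_none_cons {a b : Char} {r : List Char}
    (h : pvReduceOnce (a :: b :: r) = none) :
    (PySem.Chars.isupper a && (b == PySem.Chars.lowerChar a)) = false ∧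
      pvReduceOnce (b :: r) = none := by
  rw [pvReduceOnce] at h
  split at h
  · exact absurd h (by simp)
  · rename_i hc
    refine ⟨Bool.eq_false_iff.mpr hc, ?_⟩
    cases hr : pvReduceOnce (b :: r) with
    | none => rfl
    | some t'' => rw [hr] at h; simp at h

-- on an all-letter string with no adjacent pair that starts with an uppercase letter, A fails
theorem pvRunA_upper_stuck : ∀ (r : List Char) (X : Char) (st : List Char),
    (X :: r).all pvIsLetter = true → pvReduceOnce (X :: r) = none →
    PySem.Chars.isupper X = true → pvRunA st (X :: r) = false := by
  intro r
  induction r with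
  | nil =>
    intro X st _ _ hX
    rw [pvRunA_cons, if_pos hX, pvRunA_nil]
    simp
  | cons c r' ih =>
    intro X st hall hnone hX
    obtain ⟨hcond, hnone'⟩ := pvReduceOnce_none_cons hnone
    have hcl : pvIsLetter c = true := by
      simp only [List.all_cons, Bool.and_eq_true] at hall
      exact hall.2.1
    have hne : c ≠ PySem.Chars.lowerChar X := by
      intro hc
      rw [hX] at hcond
      simp [hc] at hcond
    rw [pvRunA_cons, if_pos hX]
    by_cases hc : PySem.Chars.isupper c = true
    · have hall' : (c :: r').all pvIsLetter = true := by
        simp only [List.all_cons, Bool.and_eq_true] at hall ⊢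
        exact ⟨hall.2.1, hall.2.2⟩
      exact ih c (X :: st) hall' hnone' hc
    · rw [Bool.not_eq_true] at hc
      have hlo : PySem.Chars.islower c = true := by
        simp only [pvIsLetter, hc, Bool.false_or] at hcl
        exact hcl
      rw [pvRunA_cons]
      simp only [hc, Bool.false_eq_true, if_false, hlo, if_true]
      simp [hne]

theorem pvReduceOnce_decomp : ∀ {t t' : List Char}, pvReduceOnce t = some t' →
    ∃ u X v, PySem.Chars.isupper X = true ∧
      t = u ++ X :: PySem.Chars.lowerChar X :: v ∧ t' = u ++ v := by
  intro t
  induction t with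
  | nil => intro t' h; simp [pvReduceOnce] at h
  | cons a rr ih =>
    intro t' h
    cases rr with
    | nil => simp [pvReduceOnce] at h
    | cons b r =>
      rw [pvReduceOnce] at h
      split at h
      · rename_i hcond
        simp only [Bool.and_eq_true, beq_iff_eq] at hcond
        obtain ⟨h1c, h2c⟩ := hcond
        injection h with h
        subst h
        exact ⟨[], a, r, h1c, by simp [h2c], rfl⟩
      · simp only [Option.map_eq_some_iff] at h
        obtain ⟨t'', h1, rfl⟩ := h
        obtain ⟨u, X, v, hX, heq, ht''⟩ := ih h1
        exact ⟨a :: u, X, v, hX, by simp [heq], by simp [ht'']⟩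

theorem pvLoopB_none {t : List Char} (h : pvReduceOnce t = none) : pvLoopB t = t.isEmpty := by
  rw [pvLoopB.eq_def]
  split
  · rename_i t' h'; rw [h] at h'; cases h'
  · rfl

theorem pvLoopB_some {t t' : List Char} (h : pvReduceOnce t = some t') : pvLoopB t = pvLoopB t' := by
  rw [pvLoopB.eq_def]
  split
  · rename_i t'' h'; rw [h] at h'; injection h' with h'; rw [h']
  · rename_i h'; rw [h] at h'; cases h'

theorem pvMain_aux : ∀ (n : Nat) (t : List Char), t.length ≤ n →
    t.all pvIsLetter = true → pvRunA [] t = pvLoopB t := by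
  intro n
  induction n with
  | zero =>
    intro t hlen _
    have ht : t = [] := by
      cases t with
      | nil => rfl
      | cons a r => simp at hlen
    subst ht
    rw [pvLoopB_none rfl]
    simp [pvRunA_nil]
  | succ n ih =>
    intro t hlen hall
    cases hred : pvReduceOnce t with
    | none =>
      rw [pvLoopB_none hred]
      cases t with
      | nil => simp [pvRunA_nil]
      | cons c r =>
        simp only [List.isEmpty_cons]
        by_cases hc : PySem.Chars.isupper c = true
        · exact pvRunA_upper_stuck r c [] hall hred hc
        · rw [Bool.not_eq_true] at hc
          have hcl : pvIsLetter c = true := by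
            simp only [List.all_cons, Bool.and_eq_true] at hall
            exact hall.1
          have hlo : PySem.Chars.islower c = true := by
            simp only [pvIsLetter, hc, Bool.false_or] at hcl
            exact hcl
          rw [pvRunA_cons]
          simp [hc, hlo]
    | some t' =>
      obtain ⟨u, X, v, hX, heq, ht'⟩ := pvReduceOnce_decomp hred
      have hlt : t'.length < t.length := pvReduceOnce_length hred
      have hall' : t'.all pvIsLetter = true := by
        subst heq; subst ht'
        simp only [List.all_append, List.all_cons, Bool.and_eq_true] at hall ⊢
        exact ⟨hall.1, hall.2.2.2⟩
      have h1 : pvRunA [] t = pvRunA [] t' := by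
        rw [heq, ht']
        exact pvRunA_pair u X v [] hX
      rw [h1, pvLoopB_some hred]
      exact ih t' (by omega) hall'

theorem pvMain : ∀ (t : List Char), t.all pvIsLetter = true → pvRunA [] t = pvLoopB t := by
  intro t h
  exact pvMain_aux t.length t le_rfl h

-- ===== VERDICT (by name: the statement is the Claim_ definition above) =====
theorem is_valid_xml_string_spec : Claim_equal_is_valid_xml_string := by
  intro s _
  unfold Spec_is_valid_xml_string is_valid_xml_string is_valid_xml_string_alt
  cases h : s.toList.all pvIsLetter with
  | true => simpa [h] using pvMain s.toList h
  | false => simpa [h] using pvRunA_bad s.toList [] h
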